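-- pv_equiv track=rewrite | github.com/mudstrand/daily_devotional | parse_messages/archive/export_matched_messages.py | extract_header_fields
-- ===== SOURCE A (Python) =====
-- from typing import Dict, List, Optional, Tuple
--
-- HDR_BODY_SEP = "=" * 67
--
-- def extract_header_fields(full_text: str) -> Dict[str, str]:
--     hdr = {"message_id": "", "subject": "", "from": "", "to": "", "date": ""}
--     for line in full_text.splitlines():
--         if line.startswith("message_id: "):
--             hdr["message_id"] = line.split("message_id: ", 1)[1].strip()
--         elif line.startswith("subject   : "):
--             hdr["subject"] = line.split("subject   : ", 1)[1].strip()
--         elif line.startswith("from      : "):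
--             hdr["from"] = line.split("from      : ", 1)[1].strip()
--         elif line.startswith("to        : "):
--             hdr["to"] = line.split("to        : ", 1)[1].strip()
--         elif line.startswith("date      : "):
--             hdr["date"] = line.split("date      : ", 1)[1].strip()
--         if line.strip() == HDR_BODY_SEP:
--             break
--     return hdr
-- ===== SOURCE B (Python) =====
-- HDR_BODY_SEP = "=" * 67
--
-- _FIELDS = (
--     ("message_id", "message_id: "),
--     ("subject", "subject   : "),
--     ("from", "from      : "),
--     ("to", "to        : "),
--     ("date", "date      : "),
-- )
--
-- def extract_header_fields(full_text):
--     # Keep only the lines before the header/body separator, then search them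
--     # back-to-front once per field (last occurrence wins, as in repeated assignment).
--     cut = []
--     for line in full_text.splitlines():
--         if line.strip() == HDR_BODY_SEP:
--             break
--         cut.append(line)
--     rev = cut[::-1]
--     hdr = {}
--     for key, prefix in _FIELDS:
--         value = ""
--         for line in rev:
--             if line.startswith(prefix):
--                 value = line[len(prefix):].strip()
--                 break
--         hdr[key] = value
--     return hdr
-- ===== Notes on version B (the rewrite author's own statement) =====
-- stated objective: alternative
-- what changed: Instead of one stateful forward pass with an if/elif chain and an in-loop break, B first truncates the line list at the separator, then answers each of the five fields independently by a back-to-front scan for the last line carrying that field's prefix (taking the suffix by slicing rather than split).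
import Mathlib
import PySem

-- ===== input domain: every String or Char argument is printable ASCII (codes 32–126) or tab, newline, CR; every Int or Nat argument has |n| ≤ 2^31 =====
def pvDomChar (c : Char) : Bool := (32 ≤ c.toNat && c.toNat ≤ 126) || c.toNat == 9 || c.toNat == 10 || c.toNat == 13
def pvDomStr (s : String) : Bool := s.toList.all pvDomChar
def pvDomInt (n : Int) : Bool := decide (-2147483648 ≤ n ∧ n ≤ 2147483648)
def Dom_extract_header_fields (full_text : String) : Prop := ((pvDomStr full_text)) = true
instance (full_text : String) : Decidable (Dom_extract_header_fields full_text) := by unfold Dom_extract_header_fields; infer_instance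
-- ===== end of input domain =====

-- B replaces the single stateful forward pass (if/elif chain + break) by: truncate the
-- line list at the separator, then one independent back-to-front scan per field
-- (objective: alternative decomposition, same cost).

-- ===== PORT A =====
-- HDR_BODY_SEP = "=" * 67
def pvSep : String := "==================================================================="

-- line.split(p, 1)[1].strip(); the getD defaults are unreachable at the call sites
-- (p is a nonempty literal, and the guard 'line.startswith(p)' guarantees two parts)
def pvAField (line p : String) : String :=
  PySem.Str.strip ((PySem.List.pyGet? ((PySem.Str.splitMax? line p 1).getD []) 1).getD "")

def pvALoop : List String → PySem.Dict String String → PySem.Dict String String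
  | [], hdr => hdr
  | line :: rest, hdr =>
    let hdr' :=
      if PySem.Str.startswith line "message_id: " then hdr.insert "message_id" (pvAField line "message_id: ")
      else if PySem.Str.startswith line "subject   : " then hdr.insert "subject" (pvAField line "subject   : ")
      else if PySem.Str.startswith line "from      : " then hdr.insert "from" (pvAField line "from      : ")
      else if PySem.Str.startswith line "to        : " then hdr.insert "to" (pvAField line "to        : ")
      else if PySem.Str.startswith line "date      : " then hdr.insert "date" (pvAField line "date      : ")
      else hdr
    if PySem.Str.strip line == pvSep then hdr' else pvALoop rest hdr'

def extract_header_fields (full_text : String) : List (String × String) :=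
  (pvALoop (PySem.Str.splitlines full_text)
    (PySem.Dict.mk [("message_id", ""), ("subject", ""), ("from", ""), ("to", ""), ("date", "")])).items

-- ===== PORT B =====
def pvFields : List (String × String) :=
  [("message_id", "message_id: "), ("subject", "subject   : "), ("from", "from      : "),
   ("to", "to        : "), ("date", "date      : ")]

-- the truncation loop of Source B (append until separator line)
def pvCut : List String → List String
  | [] => []
  | line :: rest => if PySem.Str.strip line == pvSep then [] else line :: pvCut rest

-- the inner per-field loop of Source B over the reversed truncated lines
def pvLastValue (p : String) : List String → String
  | [] => ""
  | line :: rest =>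
    if PySem.Str.startswith line p then
      PySem.Str.strip (PySem.Str.slice line (some (PySem.Str.len p)) none)
    else pvLastValue p rest

def extract_header_fields_alt (full_text : String) : List (String × String) :=
  let rev := (pvCut (PySem.Str.splitlines full_text)).reverse
  pvFields.map (fun kp => (kp.1, pvLastValue kp.2 rev))

-- ===== PRECONDITION & SPEC =====
def Spec_extract_header_fields (full_text : String) (out : List (String × String)) : Prop := out = extract_header_fields_alt full_text
instance (full_text : String) (out : List (String × String)) : Decidable (Spec_extract_header_fields full_text out) := by unfold Spec_extract_header_fields; infer_instance

-- ===== CLAIM (what is proved, stated in full; the proofs are below) =====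
def Claim_equal_extract_header_fields : Prop := ∀ (full_text : String), Dom_extract_header_fields full_text → Spec_extract_header_fields full_text (extract_header_fields full_text)

-- ===== LEMMAS AND PROOFS =====

-- Option-valued version of pvLastValue, for stating the loop invariant
def pvLv? (p : String) : List String → Option String
  | [] => none
  | line :: rest =>
    if PySem.Str.startswith line p then
      some (PySem.Str.strip (PySem.Str.slice line (some (PySem.Str.len p)) none))
    else pvLv? p rest

theorem pvLastValue_eq (p : String) (xs : List String) :
    pvLastValue p xs = (pvLv? p xs).getD "" := by
  induction xs with
  | nil => rfl
  | cons x xs ih => simp only [pvLastValue, pvLv?]; split <;> simp [ih]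

theorem pvLv?_append (p : String) (xs ys : List String) :
    pvLv? p (xs ++ ys) = (pvLv? p xs).orElse (fun _ => pvLv? p ys) := by
  induction xs with
  | nil => rfl
  | cons x xs ih => simp only [List.cons_append, pvLv?]; split <;> simp [ih]

theorem pv_go_cons (sep : List Char) (fuel : Nat) (m : Nat) (ch : Char) (rest : List Char)
    (cur : List Char) (acc : List (List Char)) :
    PySem.Chars.splitOnMax.go sep (fuel+1) m (ch :: rest) cur acc =
      if m = 0 then ((cur.reverse ++ (ch :: rest)) :: acc).reverse
      else if sep.isPrefixOf (ch :: rest) then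
        PySem.Chars.splitOnMax.go sep fuel (m-1) (List.drop sep.length (ch :: rest)) [] (cur.reverse :: acc)
      else PySem.Chars.splitOnMax.go sep fuel m rest (ch :: cur) acc := rfl

theorem pv_go_nil (sep : List Char) (fuel : Nat) (m : Nat) (cur : List Char) (acc : List (List Char)) :
    PySem.Chars.splitOnMax.go sep (fuel+1) m [] cur acc = (cur.reverse :: acc).reverse := rfl

theorem pv_splitOnMax (p t : List Char) (hp : p ≠ []) :
    PySem.Chars.splitOnMax (p ++ t) p 1 = [[], t] := by
  obtain ⟨c, cs, rfl⟩ := List.exists_cons_of_ne_nil hp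
  unfold PySem.Chars.splitOnMax
  rw [if_neg (by norm_num)]
  have hfuel : ((c :: cs ++ t).length + 1) = ((cs ++ t).length + 1) + 1 := by simp
  rw [Int.toNat_one, hfuel]
  rw [show ((c :: cs) ++ t : List Char) = c :: (cs ++ t) from rfl] at *
  rw [pv_go_cons]
  rw [if_neg (by norm_num), if_pos (by simp [List.isPrefixOf_iff_prefix])]
  have hd : List.drop (c :: cs : List Char).length (c :: (cs ++ t)) = t := by
    simp
  rw [hd]
  cases t with
  | nil => rw [pv_go_nil]; rfl
  | cons d ds => rw [pv_go_cons, if_pos rfl]; rfl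

theorem pv_head_1 {line : String} (h : PySem.Str.startswith line "message_id: " = true) :
    line.toList.head? = some 'm' := by
  simp [PySem.Str.startswith, PySem.Chars.startswith, List.isPrefixOf_iff_prefix] at h
  obtain ⟨t, ht⟩ := h
  rw [← ht]; rfl

theorem pv_head_2 {line : String} (h : PySem.Str.startswith line "subject   : " = true) :
    line.toList.head? = some 's' := by
  simp [PySem.Str.startswith, PySem.Chars.startswith, List.isPrefixOf_iff_prefix] at h
  obtain ⟨t, ht⟩ := h
  rw [← ht]; rfl

theorem pv_head_3 {line : String} (h : PySem.Str.startswith line "from      : " = true) :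
    line.toList.head? = some 'f' := by
  simp [PySem.Str.startswith, PySem.Chars.startswith, List.isPrefixOf_iff_prefix] at h
  obtain ⟨t, ht⟩ := h
  rw [← ht]; rfl

theorem pv_head_4 {line : String} (h : PySem.Str.startswith line "to        : " = true) :
    line.toList.head? = some 't' := by
  simp [PySem.Str.startswith, PySem.Chars.startswith, List.isPrefixOf_iff_prefix] at h
  obtain ⟨t, ht⟩ := h
  rw [← ht]; rfl

theorem pv_head_5 {line : String} (h : PySem.Str.startswith line "date      : " = true) :
    line.toList.head? = some 'd' := by
  simp [PySem.Str.startswith, PySem.Chars.startswith, List.isPrefixOf_iff_prefix] at h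
  obtain ⟨t, ht⟩ := h
  rw [← ht]; rfl

theorem pv_two_heads {line : String} {c c' : Char} (h1 : line.toList.head? = some c)
    (h2 : line.toList.head? = some c') : c = c' := by
  rw [h1] at h2; exact Option.some.inj h2

theorem pv_mem_dropWhile {c : Char} {l : List Char} (h : c ∈ l)
    (hc : PySem.Chars.isspace c = false) : c ∈ l.dropWhile PySem.Chars.isspace := by
  induction l with
  | nil => cases h
  | cons x xs ih =>
    by_cases hx : PySem.Chars.isspace x = true
    · rw [List.dropWhile_cons_of_pos hx]
      rcases List.mem_cons.mp h with rfl | hm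
      · rw [hx] at hc; cases hc
      · exact ih hm
    · rw [List.dropWhile_cons_of_neg hx]; exact h

theorem pv_mem_strip {c : Char} {l : List Char} (h : c ∈ l)
    (hc : PySem.Chars.isspace c = false) : c ∈ PySem.Chars.strip l := by
  unfold PySem.Chars.strip PySem.Chars.rstrip PySem.Chars.lstrip
  have h1 := pv_mem_dropWhile h hc
  have h2 : c ∈ (l.dropWhile PySem.Chars.isspace).reverse := List.mem_reverse.mpr h1
  exact List.mem_reverse.mpr (pv_mem_dropWhile h2 hc)

-- a line starting with a non-'=' non-space character is never the separator line
theorem pv_no_sep {line : String} {c : Char}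
    (hc : PySem.Chars.isspace c = false) (hne : c ≠ '=')
    (hhead : line.toList.head? = some c) :
    (PySem.Str.strip line == pvSep) = false := by
  by_contra hcon
  have heq : PySem.Str.strip line = pvSep := by
    have hb : (PySem.Str.strip line == pvSep) = true := by
      cases hb : (PySem.Str.strip line == pvSep) with
      | false => exact absurd hb hcon
      | true => rfl
    exact eq_of_beq hb
  have hmem : c ∈ line.toList := List.mem_of_mem_head? (Option.mem_def.mpr hhead)
  have hs : c ∈ PySem.Chars.strip line.toList := pv_mem_strip hmem hc
  have hmem2 : c ∈ (PySem.Str.strip line).toList := by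
    simp [PySem.Str.strip] at hs ⊢; exact hs
  rw [heq] at hmem2
  have hc' : c = '=' := by simp [pvSep] at hmem2; exact hmem2
  exact hne hc'

theorem pv_ins1 (a b c d e v : String) :
    (PySem.Dict.mk [("message_id", a), ("subject", b), ("from", c), ("to", d), ("date", e)]).insert "message_id" v
    = PySem.Dict.mk [("message_id", v), ("subject", b), ("from", c), ("to", d), ("date", e)] := by
  simp [PySem.Dict.insert]

theorem pv_ins2 (a b c d e v : String) :
    (PySem.Dict.mk [("message_id", a), ("subject", b), ("from", c), ("to", d), ("date", e)]).insert "subject" v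
    = PySem.Dict.mk [("message_id", a), ("subject", v), ("from", c), ("to", d), ("date", e)] := by
  simp [PySem.Dict.insert]

theorem pv_ins3 (a b c d e v : String) :
    (PySem.Dict.mk [("message_id", a), ("subject", b), ("from", c), ("to", d), ("date", e)]).insert "from" v
    = PySem.Dict.mk [("message_id", a), ("subject", b), ("from", v), ("to", d), ("date", e)] := by
  simp [PySem.Dict.insert]

theorem pv_ins4 (a b c d e v : String) :
    (PySem.Dict.mk [("message_id", a), ("subject", b), ("from", c), ("to", d), ("date", e)]).insert "to" v
    = PySem.Dict.mk [("message_id", a), ("subject", b), ("from", c), ("to", v), ("date", e)] := by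
  simp [PySem.Dict.insert]

theorem pv_ins5 (a b c d e v : String) :
    (PySem.Dict.mk [("message_id", a), ("subject", b), ("from", c), ("to", d), ("date", e)]).insert "date" v
    = PySem.Dict.mk [("message_id", a), ("subject", b), ("from", c), ("to", d), ("date", v)] := by
  simp [PySem.Dict.insert]

-- A's split-based field value equals B's slice-based one under the startswith guard
theorem pv_field_eq (line p : String) (hp : p.toList ≠ [])
    (h : PySem.Str.startswith line p = true) :
    pvAField line p = PySem.Str.strip (PySem.Str.slice line (some (PySem.Str.len p)) none) := by
  unfold pvAField
  have hpre : p.toList <+: line.toList := by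
    simp [PySem.Str.startswith, PySem.Chars.startswith, List.isPrefixOf_iff_prefix] at h
    exact h
  obtain ⟨t, ht⟩ := hpre
  have hsplit : PySem.Chars.splitMax? line.toList p.toList 1 = some [[], t] := by
    unfold PySem.Chars.splitMax?
    rw [if_neg (by simpa [List.isEmpty_iff] using hp), ← ht, pv_splitOnMax _ _ hp]
  have h1 : PySem.Str.splitMax? line p 1 = some [String.ofList [], String.ofList t] := by
    simp [PySem.Str.splitMax?, hsplit]
  rw [h1]
  have h3 : PySem.Str.slice line (some (PySem.Str.len p)) none = String.ofList t := by
    simp [PySem.Str.slice, PySem.Str.len, PySem.Chars.slice_eq_listSlice,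
      PySem.List.slice_from_natCast, ← ht]
  rw [h3]
  simp [PySem.List.pyGet?, PySem.List.pyIdx?]

-- the loop invariant: A's loop on any 5-value state computes B's per-field last matches
theorem pv_main (lines : List String) (a b c d e : String) :
    (pvALoop lines (PySem.Dict.mk [("message_id", a), ("subject", b), ("from", c), ("to", d), ("date", e)])).items
    = [("message_id", (pvLv? "message_id: " (pvCut lines).reverse).getD a),
       ("subject", (pvLv? "subject   : " (pvCut lines).reverse).getD b),
       ("from", (pvLv? "from      : " (pvCut lines).reverse).getD c),
       ("to", (pvLv? "to        : " (pvCut lines).reverse).getD d),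
       ("date", (pvLv? "date      : " (pvCut lines).reverse).getD e)] := by
  induction lines generalizing a b c d e with
  | nil => simp [pvALoop, pvCut, pvLv?]
  | cons line rest ih =>
    by_cases hsep : (PySem.Str.strip line == pvSep) = true
    · -- separator line: A's guards cannot fire, B keeps nothing
      have g1 : PySem.Str.startswith line "message_id: " = false := by
        cases hb : PySem.Str.startswith line "message_id: " with
        | false => rfl
        | true => exact absurd hsep (by rw [pv_no_sep (by decide) (by decide) (pv_head_1 hb)]; simp)
      have g2 : PySem.Str.startswith line "subject   : " = false := by
        cases hb : PySem.Str.startswith line "subject   : " with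
        | false => rfl
        | true => exact absurd hsep (by rw [pv_no_sep (by decide) (by decide) (pv_head_2 hb)]; simp)
      have g3 : PySem.Str.startswith line "from      : " = false := by
        cases hb : PySem.Str.startswith line "from      : " with
        | false => rfl
        | true => exact absurd hsep (by rw [pv_no_sep (by decide) (by decide) (pv_head_3 hb)]; simp)
      have g4 : PySem.Str.startswith line "to        : " = false := by
        cases hb : PySem.Str.startswith line "to        : " with
        | false => rfl
        | true => exact absurd hsep (by rw [pv_no_sep (by decide) (by decide) (pv_head_4 hb)]; simp)
      have g5 : PySem.Str.startswith line "date      : " = false := by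
        cases hb : PySem.Str.startswith line "date      : " with
        | false => rfl
        | true => exact absurd hsep (by rw [pv_no_sep (by decide) (by decide) (pv_head_5 hb)]; simp)
      simp at g1 g2 g3 g4 g5
      simp [pvALoop, pvCut, pvLv?, hsep, g1, g2, g3, g4, g5]
    · have hsep' : (PySem.Str.strip line == pvSep) = false := by
        cases hb : (PySem.Str.strip line == pvSep) with
        | false => rfl
        | true => exact absurd hb hsep
      have hcut : (pvCut (line :: rest)).reverse = (pvCut rest).reverse ++ [line] := by
        simp [pvCut, hsep']
      have key : ∀ (p : String) (v : String),
          (pvLv? p ((pvCut rest).reverse ++ [line])).getD v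
          = (pvLv? p (pvCut rest).reverse).getD
              ((if PySem.Str.startswith line p then
                  some (PySem.Str.strip (PySem.Str.slice line (some (PySem.Str.len p)) none))
                else none).getD v) := by
        intro p v
        rw [pvLv?_append]
        cases hx : pvLv? p (pvCut rest).reverse <;> simp [Option.orElse, pvLv?]
      rw [hcut]
      simp only [pvALoop, hsep', Bool.false_eq_true, if_false, key]
      by_cases m1 : PySem.Str.startswith line "message_id: " = true
      · rw [if_pos m1, pv_ins1, ih, pv_field_eq line _ (by simp) m1]
        have n2 : PySem.Str.startswith line "subject   : " = false := by
          cases hb : PySem.Str.startswith line "subject   : " with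
          | false => rfl
          | true => exact absurd (pv_two_heads (pv_head_1 m1) (pv_head_2 hb)) (by decide)
        have n3 : PySem.Str.startswith line "from      : " = false := by
          cases hb : PySem.Str.startswith line "from      : " with
          | false => rfl
          | true => exact absurd (pv_two_heads (pv_head_1 m1) (pv_head_3 hb)) (by decide)
        have n4 : PySem.Str.startswith line "to        : " = false := by
          cases hb : PySem.Str.startswith line "to        : " with
          | false => rfl
          | true => exact absurd (pv_two_heads (pv_head_1 m1) (pv_head_4 hb)) (by decide)
        have n5 : PySem.Str.startswith line "date      : " = false := by
          cases hb : PySem.Str.startswith line "date      : " with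
          | false => rfl
          | true => exact absurd (pv_two_heads (pv_head_1 m1) (pv_head_5 hb)) (by decide)
        have m' := m1
        simp at m' n2 n3 n4 n5
        simp [m', n2, n3, n4, n5]
      · rw [if_neg m1]
        by_cases m2 : PySem.Str.startswith line "subject   : " = true
        · rw [if_pos m2, pv_ins2, ih, pv_field_eq line _ (by simp) m2]
          have n1 : PySem.Str.startswith line "message_id: " = false := by
            cases hb : PySem.Str.startswith line "message_id: " with
            | false => rfl
            | true => exact absurd (pv_two_heads (pv_head_2 m2) (pv_head_1 hb)) (by decide)
          have n3 : PySem.Str.startswith line "from      : " = false := by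
            cases hb : PySem.Str.startswith line "from      : " with
            | false => rfl
            | true => exact absurd (pv_two_heads (pv_head_2 m2) (pv_head_3 hb)) (by decide)
          have n4 : PySem.Str.startswith line "to        : " = false := by
            cases hb : PySem.Str.startswith line "to        : " with
            | false => rfl
            | true => exact absurd (pv_two_heads (pv_head_2 m2) (pv_head_4 hb)) (by decide)
          have n5 : PySem.Str.startswith line "date      : " = false := by
            cases hb : PySem.Str.startswith line "date      : " with
            | false => rfl
            | true => exact absurd (pv_two_heads (pv_head_2 m2) (pv_head_5 hb)) (by decide)
          have m' := m2
          simp at m' n1 n3 n4 n5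
          simp [m', n1, n3, n4, n5]
        · rw [if_neg m2]
          by_cases m3 : PySem.Str.startswith line "from      : " = true
          · rw [if_pos m3, pv_ins3, ih, pv_field_eq line _ (by simp) m3]
            have n1 : PySem.Str.startswith line "message_id: " = false := by
              cases hb : PySem.Str.startswith line "message_id: " with
              | false => rfl
              | true => exact absurd (pv_two_heads (pv_head_3 m3) (pv_head_1 hb)) (by decide)
            have n2 : PySem.Str.startswith line "subject   : " = false := by
              cases hb : PySem.Str.startswith line "subject   : " with
              | false => rfl
              | true => exact absurd (pv_two_heads (pv_head_3 m3) (pv_head_2 hb)) (by decide)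
            have n4 : PySem.Str.startswith line "to        : " = false := by
              cases hb : PySem.Str.startswith line "to        : " with
              | false => rfl
              | true => exact absurd (pv_two_heads (pv_head_3 m3) (pv_head_4 hb)) (by decide)
            have n5 : PySem.Str.startswith line "date      : " = false := by
              cases hb : PySem.Str.startswith line "date      : " with
              | false => rfl
              | true => exact absurd (pv_two_heads (pv_head_3 m3) (pv_head_5 hb)) (by decide)
            have m' := m3
            simp at m' n1 n2 n4 n5
            simp [m', n1, n2, n4, n5]
          · rw [if_neg m3]
            by_cases m4 : PySem.Str.startswith line "to        : " = true
            · rw [if_pos m4, pv_ins4, ih, pv_field_eq line _ (by simp) m4]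
              have n1 : PySem.Str.startswith line "message_id: " = false := by
                cases hb : PySem.Str.startswith line "message_id: " with
                | false => rfl
                | true => exact absurd (pv_two_heads (pv_head_4 m4) (pv_head_1 hb)) (by decide)
              have n2 : PySem.Str.startswith line "subject   : " = false := by
                cases hb : PySem.Str.startswith line "subject   : " with
                | false => rfl
                | true => exact absurd (pv_two_heads (pv_head_4 m4) (pv_head_2 hb)) (by decide)
              have n3 : PySem.Str.startswith line "from      : " = false := by
                cases hb : PySem.Str.startswith line "from      : " with
                | false => rfl
                | true => exact absurd (pv_two_heads (pv_head_4 m4) (pv_head_3 hb)) (by decide)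
              have n5 : PySem.Str.startswith line "date      : " = false := by
                cases hb : PySem.Str.startswith line "date      : " with
                | false => rfl
                | true => exact absurd (pv_two_heads (pv_head_4 m4) (pv_head_5 hb)) (by decide)
              have m' := m4
              simp at m' n1 n2 n3 n5
              simp [m', n1, n2, n3, n5]
            · rw [if_neg m4]
              by_cases m5 : PySem.Str.startswith line "date      : " = true
              · rw [if_pos m5, pv_ins5, ih, pv_field_eq line _ (by simp) m5]
                have n1 : PySem.Str.startswith line "message_id: " = false := by
                  cases hb : PySem.Str.startswith line "message_id: " with
                  | false => rfl
                  | true => exact absurd (pv_two_heads (pv_head_5 m5) (pv_head_1 hb)) (by decide)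
                have n2 : PySem.Str.startswith line "subject   : " = false := by
                  cases hb : PySem.Str.startswith line "subject   : " with
                  | false => rfl
                  | true => exact absurd (pv_two_heads (pv_head_5 m5) (pv_head_2 hb)) (by decide)
                have n3 : PySem.Str.startswith line "from      : " = false := by
                  cases hb : PySem.Str.startswith line "from      : " with
                  | false => rfl
                  | true => exact absurd (pv_two_heads (pv_head_5 m5) (pv_head_3 hb)) (by decide)
                have n4 : PySem.Str.startswith line "to        : " = false := by
                  cases hb : PySem.Str.startswith line "to        : " with
                  | false => rfl
                  | true => exact absurd (pv_two_heads (pv_head_5 m5) (pv_head_4 hb)) (by decide)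
                have m' := m5
                simp at m' n1 n2 n3 n4
                simp [m', n1, n2, n3, n4]
              · rw [if_neg m5, ih]
                have m1' := m1
                have m2' := m2
                have m3' := m3
                have m4' := m4
                have m5' := m5
                simp at m1' m2' m3' m4' m5'
                simp [m1', m2', m3', m4', m5']

-- ===== VERDICT (by name: the statement is the Claim_ definition above) =====
theorem extract_header_fields_spec : Claim_equal_extract_header_fields := by
  intro full_text _
  unfold Spec_extract_header_fields extract_header_fields extract_header_fields_alt
  simp [pv_main, pvFields, pvLastValue_eq]
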